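-- pv_equiv track=rewrite | github.com/oginostok/incubatoio-manager | backend/routers/chick_planning.py | normalize_year_week
-- ===== SOURCE A (Python) =====
-- def normalize_year_week(year: int, week: int):
--     """Normalizes year/week when week overflows 52 or underflows."""
--     while week > 52:
--         week -= 52
--         year += 1
--     while week < 1:
--         week += 52
--         year -= 1
--     return year, week
-- ===== SOURCE B (Python) =====
-- def normalize_year_week(year: int, week: int):
--     """Normalizes year/week when week overflows 52 or underflows."""
--     q, r = divmod(week - 1, 52)
--     return year + q, r + 1
-- ===== Notes on version B (the rewrite author's own statement) =====
-- stated objective: simpler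
-- what changed: Replaced the two normalization while-loops with a single closed-form divmod on (week-1), carrying the quotient into the year.
import Mathlib
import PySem

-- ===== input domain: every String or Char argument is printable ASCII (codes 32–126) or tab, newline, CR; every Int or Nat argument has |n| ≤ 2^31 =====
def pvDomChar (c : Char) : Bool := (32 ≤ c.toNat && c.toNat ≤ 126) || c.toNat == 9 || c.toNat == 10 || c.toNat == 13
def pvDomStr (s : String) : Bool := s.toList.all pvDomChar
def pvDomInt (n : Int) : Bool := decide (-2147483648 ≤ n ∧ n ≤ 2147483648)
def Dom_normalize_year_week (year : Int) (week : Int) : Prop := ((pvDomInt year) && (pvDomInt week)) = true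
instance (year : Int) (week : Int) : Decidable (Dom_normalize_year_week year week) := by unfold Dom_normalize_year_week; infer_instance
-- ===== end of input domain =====

-- B replaces A's two carry-by-52 while-loops with a single closed-form divmod on (week-1); objective: simpler.

-- ===== PORT A =====
-- first while-loop: while week > 52: week -= 52; year += 1
def pvLoopOver (year week : Int) : Int × Int :=
  if 52 < week then pvLoopOver (year + 1) (week - 52) else (year, week)
termination_by week.toNat
decreasing_by omega

-- second while-loop: while week < 1: week += 52; year -= 1
def pvLoopUnder (year week : Int) : Int × Int :=
  if week < 1 then pvLoopUnder (year - 1) (week + 52) else (year, week)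
termination_by (1 - week).toNat
decreasing_by omega

def normalize_year_week (year : Int) (week : Int) : Int × Int :=
  let p := pvLoopOver year week
  pvLoopUnder p.1 p.2

-- ===== PORT B =====
def normalize_year_week_alt (year : Int) (week : Int) : Int × Int :=
  let q := PySem.Int.floordiv (week - 1) 52
  let r := PySem.Int.mod (week - 1) 52
  (year + q, r + 1)

-- ===== PRECONDITION & SPEC =====
def Spec_normalize_year_week (year : Int) (week : Int) (out : Int × Int) : Prop := out = normalize_year_week_alt year week
instance (year : Int) (week : Int) (out : Int × Int) : Decidable (Spec_normalize_year_week year week out) := by unfold Spec_normalize_year_week; infer_instance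

-- ===== CLAIM (what is proved, stated in full; the proofs are below) =====
def Claim_equal_normalize_year_week : Prop := ∀ (year : Int) (week : Int), Dom_normalize_year_week year week → Spec_normalize_year_week year week (normalize_year_week year week)

-- ===== LEMMAS AND PROOFS =====

-- the first loop preserves 52*year + week and ends with week ≤ 52
theorem pvLoopOver_inv (year week : Int) :
    52 * (pvLoopOver year week).1 + (pvLoopOver year week).2 = 52 * year + week ∧
    (pvLoopOver year week).2 ≤ 52 := by
  induction year, week using pvLoopOver.induct with
  | case1 y w h ih => rw [pvLoopOver, if_pos h]; omega
  | case2 y w h => rw [pvLoopOver, if_neg h]; omega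

-- the second loop preserves 52*year + week, ends with week ≥ 1, and never pushes week above 52
theorem pvLoopUnder_inv (year week : Int) (hle : week ≤ 52) :
    52 * (pvLoopUnder year week).1 + (pvLoopUnder year week).2 = 52 * year + week ∧
    1 ≤ (pvLoopUnder year week).2 ∧ (pvLoopUnder year week).2 ≤ 52 := by
  induction year, week using pvLoopUnder.induct with
  | case1 y w h ih =>
    rw [pvLoopUnder, if_pos h]
    have := ih (by omega)
    omega
  | case2 y w h => rw [pvLoopUnder, if_neg h]; omega

-- ===== VERDICT (by name: the statement is the Claim_ definition above) =====
theorem normalize_year_week_spec : Claim_equal_normalize_year_week := by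
  intro year week _
  unfold Spec_normalize_year_week normalize_year_week normalize_year_week_alt
  have h1 := pvLoopOver_inv year week
  have h2 := pvLoopUnder_inv (pvLoopOver year week).1 (pvLoopOver year week).2 h1.2
  have hd : PySem.Int.floordiv (week - 1) 52 * 52 + PySem.Int.mod (week - 1) 52 = week - 1 :=
    PySem.Int.floordiv_mul_add_mod _ _
  have hm : 0 ≤ PySem.Int.mod (week - 1) 52 ∧ PySem.Int.mod (week - 1) 52 < 52 := by
    have := PySem.Int.mod_eq_emod_of_pos (a := week - 1) (b := 52) (by omega)
    constructor
    · rw [this]; exact Int.emod_nonneg _ (by omega)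
    · rw [this]; exact Int.emod_lt_of_pos _ (by omega)
  simp only
  have := h2.1
  have := h2.2
  ext <;> simp <;> omega
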